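-- pv_equiv track=rewrite | github.com/Dhruba274/Python_Codes | append_duplicate_at_last.py | move_duplicates_to_end
-- ===== SOURCE A (Python) =====
-- def move_duplicates_to_end(lst):
--     # Create an empty list to store non-duplicate elements
--     non_duplicates = []
--     duplicate=[]
--
--     # Iterate through the input list
--     for i in lst:
--         # If the element is not in the non-duplicates list, add it
--         if i not in non_duplicates:
--             non_duplicates.append(i)
--         # If the element is already in the non-duplicates list,
--         # it is a duplicate, so remove it from the input list
--         # and continue to the next iteration
--         else:
--             duplicate.append(i)
--
--     # Concatenate the non-duplicates list with the remaining elements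
--     # of the input list to get the final result
--     result = non_duplicates + duplicate
--
--     return result
-- ===== SOURCE B (Python) =====
-- def move_duplicates_to_end(lst):
--     # Positional index: group the occurrence positions of each value, then
--     # rebuild the answer from indices (heads in value order, sorted tails).
--     positions = {}
--     for i, x in enumerate(lst):
--         positions[x] = positions.get(x, []) + [i]
--     first_idx = [ps[0] for ps in positions.values()]
--     dup_idx = sorted(i for ps in positions.values() for i in ps[1:])
--     return [lst[i] for i in first_idx] + [lst[i] for i in dup_idx]
-- ===== Notes on version B (the rewrite author's own statement) =====
-- stated objective: faster
-- what changed: Instead of A's single partition loop that scans a maintained seen-list for every element, B builds a positional index (dict value -> list of its occurrence positions) in one grouping pass and reconstructs the answer from indices: the head of each group in first-occurrence order, then the remaining positions sorted back into input order.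
import Mathlib
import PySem

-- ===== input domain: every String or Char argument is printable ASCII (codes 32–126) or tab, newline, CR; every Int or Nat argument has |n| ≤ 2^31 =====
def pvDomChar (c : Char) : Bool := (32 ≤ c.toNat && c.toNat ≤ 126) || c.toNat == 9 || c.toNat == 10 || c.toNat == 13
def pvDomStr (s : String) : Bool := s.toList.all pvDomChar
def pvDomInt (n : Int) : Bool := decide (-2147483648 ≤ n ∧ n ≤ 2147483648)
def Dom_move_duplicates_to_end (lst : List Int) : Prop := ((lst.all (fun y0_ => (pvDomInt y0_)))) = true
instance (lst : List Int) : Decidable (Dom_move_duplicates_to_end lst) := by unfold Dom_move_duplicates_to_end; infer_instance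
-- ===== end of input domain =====

-- B replaces A's single seen-list partition loop by a positional index: one grouping
-- pass builds value -> list of occurrence positions, and the answer is rebuilt from
-- indices (the head of each group in value order, then the remaining positions sorted).

-- ===== PORT A =====
-- one pass; state = (non_duplicates, duplicate), branches in A's order
def move_duplicates_to_end (lst : List Int) : List Int :=
  let st := lst.foldl
    (fun (st : List Int × List Int) i =>
      if i ∉ st.1 then (st.1 ++ [i], st.2) else (st.1, st.2 ++ [i]))
    ([], [])
  st.1 ++ st.2

-- ===== PORT B =====
-- positions[x] = positions.get(x, []) + [i]; ps[0] / lst[i] use pyGetD, whose default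
-- is never taken: every stored list is nonempty and every index comes from enumerate(lst)
def move_duplicates_to_end_alt (lst : List Int) : List Int :=
  let positions : PySem.Dict Int (List Int) :=
    (PySem.List.enumerate lst).foldl
      (fun d p => d.modify p.2 [] (fun ps => ps ++ [p.1])) PySem.Dict.empty
  let first_idx := positions.values.map (fun ps => PySem.List.pyGetD ps 0 0)
  let dup_idx := PySem.List.sorted
      (positions.values.flatMap (fun ps => PySem.List.slice ps (some 1) none))
      (fun i => i) false
  first_idx.map (fun i => PySem.List.pyGetD lst i 0)
    ++ dup_idx.map (fun i => PySem.List.pyGetD lst i 0)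

-- ===== PRECONDITION & SPEC =====
def Spec_move_duplicates_to_end (lst : List Int) (out : List Int) : Prop := out = move_duplicates_to_end_alt lst
instance (lst : List Int) (out : List Int) : Decidable (Spec_move_duplicates_to_end lst out) := by unfold Spec_move_duplicates_to_end; infer_instance

-- ===== CLAIM (what is proved, stated in full; the proofs are below) =====
def Claim_equal_move_duplicates_to_end : Prop := ∀ (lst : List Int), Dom_move_duplicates_to_end lst → Spec_move_duplicates_to_end lst (move_duplicates_to_end lst)

-- ===== LEMMAS AND PROOFS =====

-- the first occurrences of xs, given that the elements of `pre` were already seen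
def pvFsel (pre : List Int) : List Int → List Int
  | [] => []
  | x :: xs => if x ∈ pre then pvFsel pre xs else x :: pvFsel (pre ++ [x]) xs

-- the repeated occurrences of xs, given that the elements of `pre` were already seen
def pvDsel (pre : List Int) : List Int → List Int
  | [] => []
  | x :: xs => if x ∈ pre then x :: pvDsel pre xs else pvDsel (pre ++ [x]) xs

-- occurrence positions of x in lst, as Python enumerate indices
def pvOcc (lst : List Int) (x : Int) : List Int :=
  ((PySem.List.enumerate lst 0).filter (fun p => p.2 == x)).map (·.1)

-- the enumerate pairs at non-first occurrences
def pvD (lst : List Int) : List (Int × Int) :=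
  (PySem.List.enumerate lst 0).filter (fun p => decide (p.2 ∈ lst.take p.1.toNat))

theorem pvDsel_congr (xs : List Int) (pre pre' : List Int)
    (h : ∀ y, y ∈ pre ↔ y ∈ pre') : pvDsel pre xs = pvDsel pre' xs := by
  induction xs generalizing pre pre' with
  | nil => rfl
  | cons x xs ih =>
    simp only [pvDsel]
    by_cases hx : x ∈ pre
    · rw [if_pos hx, if_pos ((h x).1 hx), ih pre pre' h]
    · rw [if_neg hx, if_neg (fun h' => hx ((h x).2 h'))]
      rw [ih (pre ++ [x]) (pre' ++ [x]) (by intro y; simp [h y])]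

-- A's fold, characterised
theorem pvA_fold (xs : List Int) (nd dup : List Int) :
    xs.foldl (fun (st : List Int × List Int) i =>
        if i ∉ st.1 then (st.1 ++ [i], st.2) else (st.1, st.2 ++ [i])) (nd, dup)
      = (nd ++ pvFsel nd xs, dup ++ pvDsel nd xs) := by
  induction xs generalizing nd dup with
  | nil => simp [pvFsel, pvDsel]
  | cons x xs ih =>
    simp only [List.foldl_cons, pvFsel, pvDsel]
    by_cases hx : x ∈ nd
    · rw [if_pos hx, if_pos hx, if_neg (by simp [hx]), ih]
      simp
    · rw [if_neg hx, if_neg hx, if_pos hx, ih]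
      simp

-- A's non_duplicates list is exactly the ordered dedup of lst
theorem pvFsel_eq_set (xs pre : List Int) :
    pre ++ pvFsel pre xs = xs.foldl PySem.Set.add pre := by
  induction xs generalizing pre with
  | nil => simp [pvFsel]
  | cons x xs ih =>
    simp only [List.foldl_cons, pvFsel]
    by_cases hx : x ∈ pre
    · rw [if_pos hx]
      have : PySem.Set.add pre x = pre := by
        simp [PySem.Set.add, PySem.Set.contains, hx]
      rw [this, ih]
    · rw [if_neg hx]
      have : PySem.Set.add pre x = pre ++ [x] := by
        simp [PySem.Set.add, PySem.Set.contains, hx]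
      rw [this, ← ih (pre ++ [x])]
      simp

-- A's duplicate list = the values at non-first positions, in position order
theorem pvDsel_filter (xs pre : List Int) :
    ((PySem.List.enumerate xs ((pre.length : Int))).filter
        (fun p => decide (p.2 ∈ (pre ++ xs).take p.1.toNat))).map (·.2) = pvDsel pre xs := by
  induction xs generalizing pre with
  | nil => simp [pvDsel, PySem.List.enumerate_nil]
  | cons x xs ih =>
    rw [PySem.List.enumerate_cons]
    simp only [List.filter_cons]
    have hp : ((pre ++ x :: xs).take ((pre.length : Int)).toNat) = pre := by
      simp
    rw [hp]
    have hfull : pre ++ x :: xs = (pre ++ [x]) ++ xs := by simp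
    have hlen : ((pre.length : Int)) + 1 = (((pre ++ [x]).length : Nat) : Int) := by simp
    by_cases hx : x ∈ pre
    · rw [if_pos (by simpa using hx)]
      simp only [List.map_cons]
      rw [hlen, hfull, ih (pre ++ [x])]
      rw [pvDsel_congr xs (pre ++ [x]) pre (by intro y; simp; intro hy; rw [hy]; exact hx)]
      simp [pvDsel, hx]
    · rw [if_neg (by simpa using hx)]
      rw [hlen, hfull, ih (pre ++ [x])]
      simp [pvDsel, hx]

-- members of pvOcc
theorem pvOcc_mem (lst : List Int) (x i : Int) :
    i ∈ pvOcc lst x ↔ ∃ (k : Nat) (h : k < lst.length), i = (k : Int) ∧ lst[k] = x := by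
  unfold pvOcc
  constructor
  · intro hi
    obtain ⟨p, hp, rfl⟩ := List.mem_map.1 hi
    obtain ⟨hpe, hpx⟩ := List.mem_filter.1 hp
    obtain ⟨k, hk, rfl⟩ := (PySem.List.mem_enumerate_iff _ _ _).1 hpe
    exact ⟨k, hk, by simp, by simpa using hpx⟩
  · rintro ⟨k, hk, rfl, hx⟩
    refine List.mem_map.2 ⟨((k : Int), lst[k]), List.mem_filter.2 ⟨?_, by simpa using hx⟩, rfl⟩
    exact (PySem.List.mem_enumerate_iff _ _ _).2 ⟨k, hk, by simp⟩

theorem pvOcc_pairwise (lst : List Int) (x : Int) : (pvOcc lst x).Pairwise (· < ·) := by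
  unfold pvOcc
  exact ((PySem.List.pairwise_lt_enumerate lst 0).filter _).map _ (fun _ _ h => h)

-- the dict built by B's grouping pass, looked up
theorem pvPos_getD (lst : List Int) (x : Int) :
    (((PySem.List.enumerate lst 0).foldl
        (fun d p => d.modify p.2 [] (fun ps => ps ++ [p.1])) PySem.Dict.empty).getD x [])
      = pvOcc lst x := by
  have h := PySem.Dict.getD_foldl_modify_append
      ((PySem.List.enumerate lst 0).map (fun p => (p.2, p.1)))
      (PySem.Dict.empty (κ := Int) (ν := List Int)) x
  rw [List.foldl_map] at h
  simpa [pvOcc, List.filter_map, List.map_map, Function.comp] using h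

theorem pvPos_values (lst : List Int) :
    (((PySem.List.enumerate lst 0).foldl
        (fun d p => d.modify p.2 [] (fun ps => ps ++ [p.1])) PySem.Dict.empty).values)
      = (PySem.Set.ofList lst).map (fun x => pvOcc lst x) := by
  have hk : (((PySem.List.enumerate lst 0).foldl
      (fun d p => d.modify p.2 [] (fun ps => ps ++ [p.1])) PySem.Dict.empty).keys)
      = PySem.Set.ofList lst := by
    have h := PySem.Dict.keys_foldl_modify_key (PySem.List.enumerate lst 0)
      (fun p => p.2) ([] : List Int) (fun _ p ps => ps ++ [p.1]) PySem.Dict.empty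
    simpa [PySem.List.map_snd_enumerate, PySem.Set.update, PySem.Set.ofList_eq_foldl] using h
  have hnd : (((PySem.List.enumerate lst 0).foldl
      (fun d p => d.modify p.2 [] (fun ps => ps ++ [p.1])) PySem.Dict.empty).keys).Nodup := by
    exact PySem.Dict.nodup_keys_foldl_modify_key (PySem.List.enumerate lst 0)
      (fun p => p.2) ([] : List Int)
      (fun _ p ps => ps ++ [p.1]) PySem.Dict.empty PySem.Dict.nodup_keys_empty
  rw [PySem.Dict.values_eq_map_keys _ hnd ([] : List Int), hk]
  exact List.map_congr_left (fun x _ => pvPos_getD lst x)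

-- membership in a take, by index
theorem pvMemTake (l : List Int) (m : Nat) (x : Int) :
    x ∈ l.take m ↔ ∃ (j : Nat) (hj : j < l.length), j < m ∧ l[j] = x := by
  constructor
  · intro hx
    obtain ⟨i, hi, hg⟩ := List.mem_iff_getElem.1 hx
    rw [List.length_take] at hi
    refine ⟨i, lt_of_lt_of_le hi (min_le_right _ _), lt_of_lt_of_le hi (min_le_left _ _), ?_⟩
    simp only [List.getElem_take] at hg; exact hg
  · rintro ⟨j, hj, hjm, hx⟩
    exact List.mem_iff_getElem.2 ⟨j, by simp [List.length_take]; omega, by simpa using hx⟩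

-- head of the occurrence list vs "seen before position k"
theorem pvOcc_tail_mem (lst : List Int) (k : Nat) (h : k < lst.length) :
    (k : Int) ∈ (pvOcc lst (lst[k])).tail ↔ lst[k] ∈ lst.take k := by
  have hkmem : (k : Int) ∈ pvOcc lst (lst[k]) := (pvOcc_mem _ _ _).2 ⟨k, h, rfl, rfl⟩
  have hpw := pvOcc_pairwise lst (lst[k])
  rcases hocc : pvOcc lst (lst[k]) with _ | ⟨a, t⟩
  · rw [hocc] at hkmem; simp at hkmem
  · rw [hocc] at hkmem hpw
    have hat : ∀ b ∈ t, a < b := (List.pairwise_cons.1 hpw).1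
    have hamem : a ∈ pvOcc lst (lst[k]) := by rw [hocc]; exact List.mem_cons_self
    obtain ⟨j0, hj0, ha, hx0⟩ := (pvOcc_mem _ _ _).1 hamem
    simp only [List.tail_cons]
    constructor
    · intro hkt
      have hlt : (j0 : Int) < (k : Int) := ha ▸ hat _ hkt
      have hj0k : j0 < k := by exact_mod_cast hlt
      exact (pvMemTake lst k (lst[k])).2 ⟨j0, hj0, hj0k, hx0⟩
    · intro htake
      obtain ⟨j, hj, hjk, hxj⟩ := (pvMemTake lst k (lst[k])).1 htake
      have hjmem : (j : Int) ∈ pvOcc lst (lst[k]) := (pvOcc_mem _ _ _).2 ⟨j, hj, rfl, hxj⟩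
      have hak : a < (k : Int) := by
        rw [hocc] at hjmem
        rcases List.mem_cons.1 hjmem with hja | hjt
        · have : j0 = j := by rw [ha] at hja; exact_mod_cast hja.symm
          rw [ha]; exact_mod_cast (this ▸ hjk)
        · calc a < (j : Int) := hat _ hjt
               _ < (k : Int) := by exact_mod_cast hjk
      rcases List.mem_cons.1 hkmem with hka | hkt
      · exact absurd hka.symm (ne_of_lt hak)
      · exact hkt

-- the index part of pvD
theorem pvD_idx_mem (lst : List Int) (i : Int) :
    i ∈ (pvD lst).map (·.1) ↔
      ∃ (k : Nat) (h : k < lst.length), i = (k : Int) ∧ lst[k] ∈ lst.take k := by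
  unfold pvD
  constructor
  · intro hi
    obtain ⟨p, hp, rfl⟩ := List.mem_map.1 hi
    obtain ⟨hpe, hpd⟩ := List.mem_filter.1 hp
    obtain ⟨k, hk, rfl⟩ := (PySem.List.mem_enumerate_iff _ _ _).1 hpe
    refine ⟨k, hk, by simp, ?_⟩
    simpa using of_decide_eq_true hpd
  · rintro ⟨k, hk, rfl, hkd⟩
    refine List.mem_map.2 ⟨((k : Int), lst[k]), List.mem_filter.2 ⟨?_, ?_⟩, rfl⟩
    · exact (PySem.List.mem_enumerate_iff _ _ _).2 ⟨k, hk, by simp⟩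
    · simp [hkd]

theorem pvD_idx_pairwise (lst : List Int) : ((pvD lst).map (·.1)).Pairwise (· < ·) := by
  unfold pvD
  exact ((PySem.List.pairwise_lt_enumerate lst 0).filter _).map _ (fun _ _ h => h)

-- B's flattened tails are a permutation of the non-first positions in order
theorem pvFlat_perm (lst : List Int) :
    (((PySem.Set.ofList lst).map (fun x => pvOcc lst x)).flatMap (fun ps => ps.tail)).Perm
      ((pvD lst).map (·.1)) := by
  have hmem : ∀ i, (i ∈ ((PySem.Set.ofList lst).map (fun x => pvOcc lst x)).flatMap
      (fun ps => ps.tail)) ↔ i ∈ (pvD lst).map (·.1) := by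
    intro i
    rw [pvD_idx_mem]
    constructor
    · intro hi
      obtain ⟨ps, hps, hips⟩ := List.mem_flatMap.1 hi
      obtain ⟨x, hx, rfl⟩ := List.mem_map.1 hps
      have himem : i ∈ pvOcc lst x := List.mem_of_mem_tail hips
      obtain ⟨k, hk, rfl, hxk⟩ := (pvOcc_mem _ _ _).1 himem
      subst hxk
      exact ⟨k, hk, rfl, (pvOcc_tail_mem lst k hk).1 hips⟩
    · rintro ⟨k, hk, rfl, hkd⟩
      refine List.mem_flatMap.2 ⟨pvOcc lst (lst[k]), List.mem_map.2 ⟨lst[k], ?_, rfl⟩,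
        (pvOcc_tail_mem lst k hk).2 hkd⟩
      exact (PySem.Set.mem_ofList _ _).2 (List.getElem_mem hk)
  have hocc_nd : ∀ x : Int, (pvOcc lst x).Nodup :=
    fun x => (pvOcc_pairwise lst x).imp (fun h => ne_of_lt h)
  have hnd2 : ((pvD lst).map (·.1)).Nodup :=
    (pvD_idx_pairwise lst).imp (fun h => ne_of_lt h)
  have hdisj : ∀ x y : Int, x ≠ y → List.Disjoint (pvOcc lst x).tail (pvOcc lst y).tail := by
    intro x y hxy a hax hay
    obtain ⟨k, hk, rfl, hxk⟩ := (pvOcc_mem _ _ _).1 (List.mem_of_mem_tail hax)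
    obtain ⟨k', hk', he, hyk⟩ := (pvOcc_mem _ _ _).1 (List.mem_of_mem_tail hay)
    have hkk : k = k' := by exact_mod_cast he
    cases hkk
    exact hxy (hxk.symm.trans hyk)
  have hnd1 : (((PySem.Set.ofList lst).map (fun x => pvOcc lst x)).flatMap
      (fun ps => ps.tail)).Nodup := by
    rw [List.flatMap_def, List.map_map]
    refine List.nodup_flatten.2 ⟨?_, ?_⟩
    · intro l hl
      obtain ⟨x, _, rfl⟩ := List.mem_map.1 hl
      exact (hocc_nd x).sublist (List.tail_sublist _)
    · exact List.Pairwise.map _ (fun a b hab => hdisj a b hab) (PySem.Set.nodup_ofList lst)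
  exact (hnd1.subperm (fun i hi => (hmem i).1 hi)).antisymm
    (hnd2.subperm (fun i hi => (hmem i).2 hi))

-- ===== VERDICT (by name: the statement is the Claim_ definition above) =====
theorem move_duplicates_to_end_spec : Claim_equal_move_duplicates_to_end := by
  intro lst _
  unfold Spec_move_duplicates_to_end
  have hget : ∀ p ∈ pvD lst, PySem.List.pyGetD lst p.1 0 = p.2 := by
    intro p hp
    obtain ⟨k, hk, rfl⟩ :=
      (PySem.List.mem_enumerate_iff _ _ _).1 (List.mem_filter.1 hp).1
    simp [PySem.List.pyGetD_natCast, hk]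
  have hfirst : ∀ x ∈ PySem.Set.ofList lst,
      PySem.List.pyGetD lst (PySem.List.pyGetD (pvOcc lst x) 0 0) 0 = x := by
    intro x hx
    obtain ⟨k, hk, hxk⟩ := List.mem_iff_getElem.1 ((PySem.Set.mem_ofList _ _).1 hx)
    have hkm : (k : Int) ∈ pvOcc lst x := (pvOcc_mem _ _ _).2 ⟨k, hk, rfl, hxk⟩
    rcases hocc : pvOcc lst x with _ | ⟨a, t⟩
    · rw [hocc] at hkm; simp at hkm
    · have hamem : a ∈ pvOcc lst x := by rw [hocc]; exact List.mem_cons_self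
      obtain ⟨j, hj, ha, hxj⟩ := (pvOcc_mem _ _ _).1 hamem
      rw [PySem.List.pyGetD_zero_cons, ha]
      simp [PySem.List.pyGetD_natCast, hj, hxj]
  have hA : move_duplicates_to_end lst = PySem.Set.ofList lst ++ (pvD lst).map (·.2) := by
    unfold move_duplicates_to_end
    rw [pvA_fold lst [] []]
    simp only [List.nil_append]
    congr 1
    · have h1 := pvFsel_eq_set lst []
      simp only [List.nil_append] at h1
      rw [h1, PySem.Set.ofList_eq_foldl]
    · have h2 := pvDsel_filter lst []
      simp only [List.nil_append, List.length_nil, Nat.cast_zero] at h2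
      rw [← h2]; rfl
  have hB : move_duplicates_to_end_alt lst
      = PySem.Set.ofList lst ++ (pvD lst).map (·.2) := by
    unfold move_duplicates_to_end_alt
    simp only [PySem.List.slice_from_one, pvPos_values]
    congr 1
    · rw [List.map_map, List.map_map]
      have h := List.map_congr_left (l := PySem.Set.ofList lst)
        (f := ((fun i => PySem.List.pyGetD lst i 0) ∘ fun ps => PySem.List.pyGetD ps 0 0) ∘
          fun x => pvOcc lst x)
        (g := id) (fun x hx => hfirst x hx)
      rw [h, List.map_id]
    · rw [PySem.List.sorted_eq_of_perm_of_pairwise_lt _ ((pvD lst).map (·.1)) (fun i => i)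
        (pvFlat_perm lst).symm (by simpa using pvD_idx_pairwise lst)]
      rw [List.map_map]
      exact List.map_congr_left (fun p hp => hget p hp)
  rw [hA, hB]
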